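-- pv_equiv track=rewrite | github.com/AlejandroFernandezUCAB/Ejercicios-HackerRank | 2.py | jobOffers
-- ===== SOURCE A (Python) =====
-- def jobOffers(scores, lowerLimits, upperLimits):
--     x = 0
--     y = 0
--     aux = 0
--     q = len(lowerLimits)
--     array = []
--     contador = 0
--     while( x < len(lowerLimits)):
--         contador = 0
--         y = 0
--         while(y < len(scores)):
--
--             if ((scores[y] >= lowerLimits[x]) and (scores[y] <= upperLimits[x])):
--                 contador = contador + 1
--
--
--             y = y+ 1
--         array.append( contador )
--         x =x+1
--
--     return array
-- ===== SOURCE B (Python) =====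
-- def _bisect_left(a, x):
--     lo, hi = 0, len(a)
--     while lo < hi:
--         mid = (lo + hi) // 2
--         if a[mid] < x:
--             lo = mid + 1
--         else:
--             hi = mid
--     return lo
--
--
-- def _bisect_right(a, x):
--     lo, hi = 0, len(a)
--     while lo < hi:
--         mid = (lo + hi) // 2
--         if x < a[mid]:
--             hi = mid
--         else:
--             lo = mid + 1
--     return lo
--
--
-- def jobOffers(scores, lowerLimits, upperLimits):
--     a = sorted(scores)
--     res = []
--     for l, u in zip(lowerLimits, upperLimits):
--         lo = _bisect_left(a, l)
--         hi = _bisect_right(a, u)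
--         res.append(max(0, hi - lo))
--     return res
-- ===== Notes on version B (the rewrite author's own statement) =====
-- stated objective: faster
-- what changed: Instead of re-scanning all scores for every query, B sorts the scores once and answers each query with two binary searches (bisect_left of the lower bound, bisect_right of the upper bound), the count being the clamped difference of the two positions.
-- outside the precondition, e.g. on jobOffers([], [1, 2], []): A returns [0, 0], B returns []; on jobOffers([1], [5, 5], []): A returns [0, 0], B returns []
import Mathlib
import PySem

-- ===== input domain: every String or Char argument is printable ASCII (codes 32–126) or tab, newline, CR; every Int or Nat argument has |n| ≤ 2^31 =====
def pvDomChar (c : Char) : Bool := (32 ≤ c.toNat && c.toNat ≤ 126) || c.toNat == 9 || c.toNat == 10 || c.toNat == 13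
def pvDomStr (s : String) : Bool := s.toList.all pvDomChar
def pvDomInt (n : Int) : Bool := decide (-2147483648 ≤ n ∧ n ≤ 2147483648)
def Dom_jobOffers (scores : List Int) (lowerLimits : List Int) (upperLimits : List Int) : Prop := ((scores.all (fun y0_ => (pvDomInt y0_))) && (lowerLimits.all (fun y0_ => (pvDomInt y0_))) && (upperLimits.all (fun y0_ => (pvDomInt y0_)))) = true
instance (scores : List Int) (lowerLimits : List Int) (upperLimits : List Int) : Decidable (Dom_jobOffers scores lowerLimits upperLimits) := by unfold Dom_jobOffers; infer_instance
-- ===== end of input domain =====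

-- B sorts the scores once and answers each query by two binary searches; proved equal to A's
-- per-query linear scan on all inputs where the limit lists are compatible (Pre_ below).


-- ===== PORT A =====
-- inner 'while y < len(scores)' loop: counts scores in [lo, hi]
def jobOffersCount (scores : List Int) (lo hi : Int) (y : Nat) (contador : Int) : Int :=
  if h : y < scores.length then
    jobOffersCount scores lo hi (y + 1)
      (if lo ≤ scores[y] ∧ scores[y] ≤ hi then contador + 1 else contador)
  else contador
termination_by scores.length - y

-- outer 'while x < len(lowerLimits)' loop; lowerLimits[x]/upperLimits[x] are in range on Pre_,
-- so getD _ 0 is exact there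
def jobOffersOuter (scores : List Int) (lowerLimits : List Int) (upperLimits : List Int)
    (x : Nat) (array : List Int) : List Int :=
  if h : x < lowerLimits.length then
    jobOffersOuter scores lowerLimits upperLimits (x + 1)
      (array ++ [jobOffersCount scores (lowerLimits.getD x 0) (upperLimits.getD x 0) 0 0])
  else array
termination_by lowerLimits.length - x

def jobOffers (scores : List Int) (lowerLimits : List Int) (upperLimits : List Int) : List Int :=
  jobOffersOuter scores lowerLimits upperLimits 0 []

-- ===== PORT B =====
-- Source B's _bisect_left/_bisect_right are the standard lo/hi halving loops, exactly
-- PySem.List.bisectLeft / bisectRight; sorted(scores) is PySem.List.sorted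
def jobOffers_alt (scores : List Int) (lowerLimits : List Int) (upperLimits : List Int) : List Int :=
  let a := PySem.List.sorted scores (fun x => x) false
  (lowerLimits.zip upperLimits).map (fun p =>
    let lo := PySem.List.bisectLeft a p.1
    let hi := PySem.List.bisectRight a p.2
    max 0 ((hi : Int) - (lo : Int)))

-- ===== PRECONDITION & SPEC =====
-- Pre_ excludes inputs with more lowerLimits than upperLimits: there A raises IndexError on
-- upperLimits[x] as soon as some score reaches the lower bound of an excess query, and otherwise
-- (empty scores, or no score ever reaching that bound) its zero counts for queries that have no
-- upper bound at all are an accident of short-circuit evaluation; B answers the paired queries.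
def Pre_jobOffers (scores : List Int) (lowerLimits : List Int) (upperLimits : List Int) : Prop :=
  lowerLimits.length ≤ upperLimits.length
instance (scores : List Int) (lowerLimits : List Int) (upperLimits : List Int) : Decidable (Pre_jobOffers scores lowerLimits upperLimits) := by unfold Pre_jobOffers; infer_instance

def pvWitness_jobOffers : List Int × List Int × List Int := ([3, 1, 2], [1, 2], [2, 3])

def Spec_jobOffers (scores : List Int) (lowerLimits : List Int) (upperLimits : List Int) (out : List Int) : Prop := out = jobOffers_alt scores lowerLimits upperLimits
instance (scores : List Int) (lowerLimits : List Int) (upperLimits : List Int) (out : List Int) : Decidable (Spec_jobOffers scores lowerLimits upperLimits out) := by unfold Spec_jobOffers; infer_instance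

-- ===== CLAIM (what is proved, stated in full; the proofs are below) =====
def Claim_equal_jobOffers : Prop := ∀ (scores : List Int) (lowerLimits : List Int) (upperLimits : List Int), Dom_jobOffers scores lowerLimits upperLimits → Pre_jobOffers scores lowerLimits upperLimits → Spec_jobOffers scores lowerLimits upperLimits (jobOffers scores lowerLimits upperLimits)
-- ===== LEMMAS AND PROOFS =====

-- the predicate counted by both sides
def inRange (lo hi : Int) (s : Int) : Bool := decide (lo ≤ s ∧ s ≤ hi)

-- A's inner loop counts the in-range scores from index y on
theorem jobOffersCount_eq (scores : List Int) (lo hi : Int) :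
    ∀ (y : Nat) (c : Int),
      jobOffersCount scores lo hi y c = c + ((scores.drop y).countP (inRange lo hi) : Int) := by
  intro y c
  fun_induction jobOffersCount scores lo hi y c with
  | case1 y c h ih =>
    rw [show (dite (lo ≤ scores[y] ∧ scores[y] ≤ hi) (fun _ => c + 1) (fun _ => c)) = (if lo ≤ scores[y] ∧ scores[y] ≤ hi then c + 1 else c) from by split_ifs <;> rfl] at ih
    rw [ih, List.drop_eq_getElem_cons h, List.countP_cons]
    by_cases hc : lo ≤ scores[y] ∧ scores[y] ≤ hi
    · simp only [if_pos hc, show inRange lo hi scores[y] = true by simp [inRange, hc]]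
      push_cast; ring
    · simp only [if_neg hc, show inRange lo hi scores[y] = false by simp [inRange]; omega]
      push_cast; ring
  | case2 y c h =>
    rw [List.drop_eq_nil_of_le (by omega)]
    simp

-- a list cut into a prefix satisfying p and a suffix refuting p has countP = the cut point
theorem countP_eq_of_cut (a : List Int) (p : Int → Bool) (k : Nat) (hk : k ≤ a.length)
    (h1 : ∀ (j : Nat) (hj : j < a.length), j < k → p a[j])
    (h2 : ∀ (j : Nat) (hj : j < a.length), k ≤ j → ¬ p a[j]) :
    a.countP p = k := by
  have := List.take_append_drop k a
  calc a.countP p = (a.take k ++ a.drop k).countP p := by rw [this]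
    _ = (a.take k).countP p + (a.drop k).countP p := List.countP_append ..
    _ = k := by
      have ht : (a.take k).countP p = k := by
        rw [List.countP_eq_length.mpr, List.length_take_of_le hk]
        intro e he
        obtain ⟨i, hi, rfl⟩ := List.mem_iff_getElem.mp he
        have hik : i < k := by simpa using (List.length_take_of_le hk ▸ hi)
        rw [List.getElem_take]
        exact h1 i (by omega) hik
      have hd : (a.drop k).countP p = 0 := by
        rw [List.countP_eq_zero]
        intro e he
        obtain ⟨i, hi, rfl⟩ := List.mem_iff_getElem.mp he
        rw [List.getElem_drop]
        exact h2 (k + i) (by simp at hi; omega) (by omega)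
      omega

-- bisectLeft on a nondecreasing list is the number of elements < x
theorem bisectLeft_eq_countP (a : List Int) (x : Int)
    (hs : a.Pairwise (fun p q => p ≤ q)) :
    PySem.List.bisectLeft a x = a.countP (fun e => decide (e < x)) := by
  obtain ⟨h1, h2, h3⟩ := PySem.List.bisectLeft_spec a x hs
  exact (countP_eq_of_cut a _ _ h1 (fun j hj hjk => by simpa using h2 j hj hjk)
    (fun j hj hkj => by simpa using h3 j hj hkj)).symm

-- bisectRight on a nondecreasing list is the number of elements ≤ x
theorem bisectRight_eq_countP (a : List Int) (x : Int)
    (hs : a.Pairwise (fun p q => p ≤ q)) :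
    PySem.List.bisectRight a x = a.countP (fun e => decide (e ≤ x)) := by
  obtain ⟨h1, h2, h3⟩ := PySem.List.bisectRight_spec a x hs
  exact (countP_eq_of_cut a _ _ h1 (fun j hj hjk => by simpa using h2 j hj hjk)
    (fun j hj hkj => by simpa using h3 j hj hkj)).symm

-- pointwise split: an element ≤ u is either < l or in [l,u] (when l ≤ u)
theorem count_split (xs : List Int) (l u : Int) (hlu : l ≤ u) :
    xs.countP (fun e => decide (e ≤ u)) =
      xs.countP (fun e => decide (e < l)) + xs.countP (inRange l u) := by
  induction xs with
  | nil => simp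
  | cons a t ih =>
    simp only [List.countP_cons, inRange] at *
    by_cases h1 : a < l <;> by_cases h2 : a ≤ u <;>
      simp [h1, h2, ih] <;> first | (split_ifs <;> omega) | omega

-- on any list: (#≤u) − (#<l), clamped at 0, is the number of elements in [l,u]
theorem interval_count (xs : List Int) (l u : Int) :
    max 0 ((xs.countP (fun e => decide (e ≤ u)) : Int) - (xs.countP (fun e => decide (e < l)) : Int))
      = (xs.countP (inRange l u) : Int) := by
  by_cases hlu : l ≤ u
  · rw [count_split xs l u hlu]
    push_cast; omega
  · have h0 : xs.countP (inRange l u) = 0 := by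
      rw [List.countP_eq_zero]
      intro a _
      simp [inRange]; omega
    have hle : xs.countP (fun e => decide (e ≤ u)) ≤ xs.countP (fun e => decide (e < l)) := by
      apply List.countP_mono_left
      intro a _ h
      simp at h ⊢; omega
    rw [h0]
    push_cast; omega

-- A's outer loop, under Pre_, appends the per-pair counts of the remaining zipped queries
theorem jobOffersOuter_eq (scores : List Int) (lowerLimits upperLimits : List Int)
    (hpre : lowerLimits.length ≤ upperLimits.length) :
    ∀ (x : Nat) (array : List Int),
      jobOffersOuter scores lowerLimits upperLimits x array =
        array ++ ((lowerLimits.zip upperLimits).drop x).map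
          (fun p => ((scores.countP (inRange p.1 p.2)) : Int)) := by
  intro x array
  fun_induction jobOffersOuter scores lowerLimits upperLimits x array with
  | case1 x array h ih =>
    rw [ih]
    have hxu : x < upperLimits.length := by omega
    have hz : x < (lowerLimits.zip upperLimits).length := by simp; omega
    rw [List.drop_eq_getElem_cons hz]
    simp only [List.map_cons, List.getElem_zip, List.getD_eq_getElem?_getD,
      List.getElem?_eq_getElem h, List.getElem?_eq_getElem hxu, Option.getD_some]
    rw [jobOffersCount_eq]
    simp
  | case2 x array h =>
    rw [List.drop_eq_nil_of_le (by simp; omega)]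
    simp

-- ===== VERDICT (by name: the statement is the Claim_ definition above) =====
theorem jobOffers_spec : Claim_equal_jobOffers := by
  intro scores lowerLimits upperLimits _ hpre
  unfold Spec_jobOffers jobOffers jobOffers_alt
  rw [jobOffersOuter_eq scores lowerLimits upperLimits hpre 0 []]
  simp only [List.drop_zero, List.nil_append]
  apply List.map_congr_left
  intro p _
  have hs : (PySem.List.sorted scores (fun x => x) false).Pairwise (fun a b => a ≤ b) :=
    PySem.List.sorted_pairwise scores (fun x => x)
  have hperm : (PySem.List.sorted scores (fun x => x) false).Perm scores :=
    PySem.List.sorted_perm scores (fun x => x) false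
  simp only [bisectLeft_eq_countP _ p.1 hs, bisectRight_eq_countP _ p.2 hs]
  rw [interval_count, hperm.countP_eq]
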